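-- pv_equiv track=rewrite | github.com/icrphysics/RSStaticCodeChecker | RSStaticCodeChecker/static_code_checker/generated/argument_change_767.py | argumentsRight
-- ===== SOURCE A (Python) =====
-- def argumentsRight(d):
--     args = ["SnoutId","SpotTuneId","RangeShifter","MinimumAirGap","MetersetRateSetting","IsocenterData","Name","Description","GantryAngle","CouchAngle","CollimatorAngle"]
--     too_many = []
--     for keyword in d.get("keywords", []):
--         if keyword.get("arg") in args:
--             args.remove(keyword.get("arg"))
--         else:
--             too_many.append(keyword.get("arg"))
--     if not too_many and not args:
--         return True
--     return (0 if too_many else 3)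
-- ===== SOURCE B (Python) =====
-- EXPECTED = ["SnoutId","SpotTuneId","RangeShifter","MinimumAirGap","MetersetRateSetting","IsocenterData","Name","Description","GantryAngle","CouchAngle","CollimatorAngle"]
--
-- def argumentsRight(d):
--     kws = [k.get("arg") for k in d.get("keywords", [])]
--     too_many = any(a not in EXPECTED or kws.count(a) >= 2 for a in kws)
--     missing = any(e not in kws for e in EXPECTED)
--     if too_many:
--         return 0
--     return 3 if missing else True
-- ===== Notes on version B (the rewrite author's own statement) =====
-- stated objective: simpler
-- what changed: Replaces A's destructive shrink-the-expected-list-and-append loop with a declarative decomposition: collect the keyword arg names once, then decide too_many by set membership plus a duplicate count and missing by plain membership.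
import Mathlib
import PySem

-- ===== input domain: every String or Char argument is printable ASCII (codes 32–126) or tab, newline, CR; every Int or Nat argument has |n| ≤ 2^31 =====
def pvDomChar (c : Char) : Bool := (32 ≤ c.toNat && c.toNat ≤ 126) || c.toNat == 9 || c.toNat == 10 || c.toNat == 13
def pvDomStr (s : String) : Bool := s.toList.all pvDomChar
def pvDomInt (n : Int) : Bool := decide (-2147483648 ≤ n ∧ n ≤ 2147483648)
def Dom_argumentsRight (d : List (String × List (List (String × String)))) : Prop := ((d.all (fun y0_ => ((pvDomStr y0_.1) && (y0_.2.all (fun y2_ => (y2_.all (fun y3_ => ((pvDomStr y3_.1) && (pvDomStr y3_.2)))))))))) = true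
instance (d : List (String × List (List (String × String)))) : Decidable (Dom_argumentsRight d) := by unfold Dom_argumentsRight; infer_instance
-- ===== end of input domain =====

-- B replaces A's destructive remove-once loop by declarative membership/duplicate-count checks over
-- the list of keyword names (objective: simpler; same observable behaviour, Python's True ported as 1).

-- ===== PORT A =====
-- Python's `x in args` where x is an Optional value and args a list of strings: None is never a member.
def pvOptIn (a : Option String) (xs : List String) : Bool :=
  match a with
  | some s => xs.contains s
  | none => false

-- One iteration of A's for-loop over state (args, too_many); `args.remove(v)` with v present in args
-- is List.erase (exact: PySem.List.remove?_eq_some_erase).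
def pvStepA (st : List String × List (Option String)) (a : Option String) :
    List String × List (Option String) :=
  match a with
  | some s => if st.1.contains s then (st.1.erase s, st.2) else (st.1, st.2 ++ [some s])
  | none => (st.1, st.2 ++ [none])

def argumentsRight (d : List (String × List (List (String × String)))) : Int :=
  let args := ["SnoutId","SpotTuneId","RangeShifter","MinimumAirGap","MetersetRateSetting","IsocenterData","Name","Description","GantryAngle","CouchAngle","CollimatorAngle"]
  let st := ((PySem.Dict.mk d).getD "keywords" []).foldl
      (fun st k => pvStepA st ((PySem.Dict.mk k).get? "arg")) (args, ([] : List (Option String)))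
  if st.2.isEmpty && st.1.isEmpty then 1
  else if !st.2.isEmpty then 0 else 3

-- ===== PORT B =====
def pvExpected : List String :=
  ["SnoutId","SpotTuneId","RangeShifter","MinimumAirGap","MetersetRateSetting","IsocenterData","Name","Description","GantryAngle","CouchAngle","CollimatorAngle"]

def argumentsRight_alt (d : List (String × List (List (String × String)))) : Int :=
  let kws := ((PySem.Dict.mk d).getD "keywords" []).map (fun k => (PySem.Dict.mk k).get? "arg")
  let tooMany := kws.any (fun a => !pvOptIn a pvExpected || decide (2 ≤ PySem.List.count kws a))
  let missing := pvExpected.any (fun e => !kws.contains (some e))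
  if tooMany then 0 else if missing then 3 else 1

-- ===== PRECONDITION & SPEC =====
def Spec_argumentsRight (d : List (String × List (List (String × String)))) (out : Int) : Prop := out = argumentsRight_alt d
instance (d : List (String × List (List (String × String)))) (out : Int) : Decidable (Spec_argumentsRight d out) := by unfold Spec_argumentsRight; infer_instance

-- ===== CLAIM (what is proved, stated in full; the proofs are below) =====
def Claim_equal_argumentsRight : Prop := ∀ (d : List (String × List (List (String × String)))), Dom_argumentsRight d → Spec_argumentsRight d (argumentsRight d)

-- ===== LEMMAS AND PROOFS =====

theorem pvOptIn_erase (a : Option String) (args : List String) (s : String) (h : args.Nodup) :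
    pvOptIn a (args.erase s) = (pvOptIn a args && a != some s) := by
  match a with
  | none => simp [pvOptIn]
  | some t =>
    simp only [pvOptIn, List.Nodup.erase_eq_filter h s]
    by_cases hts : t = s <;>
      simp [hts]

theorem pvLoop_fst (opts : List (Option String)) : ∀ (args : List String) (tm : List (Option String)),
    args.Nodup → (opts.foldl pvStepA (args, tm)).1 = args.filter (fun e => !opts.contains (some e)) := by
  induction opts with
  | nil => intro args tm _; simp
  | cons a rest ih =>
    intro args tm h
    match a with
    | none =>
      simp only [List.foldl_cons, pvStepA]
      rw [ih args (tm ++ [none]) h]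
      apply List.filter_congr
      intro e _
      simp
    | some s =>
      simp only [List.foldl_cons, pvStepA]
      by_cases hc : args.contains s = true
      · simp only [hc, if_pos]
        rw [ih (args.erase s) tm (h.erase s)]
        rw [List.Nodup.erase_eq_filter h s, List.filter_filter]
        apply List.filter_congr
        intro e _
        by_cases hes : e = s <;> simp [hes]
      · simp only [hc, if_neg, Bool.false_eq_true, not_false_iff]
        rw [ih args (tm ++ [some s]) h]
        apply List.filter_congr
        intro e he
        have hes : ¬ (e = s) := by rintro rfl; exact hc (by simpa using he)
        simp [hes]

theorem pvLoop_snd (opts : List (Option String)) : ∀ (args : List String) (tm : List (Option String)),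
    args.Nodup →
    ((opts.foldl pvStepA (args, tm)).2 = [] ↔
      tm = [] ∧ opts.Nodup ∧ ∀ a ∈ opts, pvOptIn a args = true) := by
  induction opts with
  | nil => intro args tm _; simp
  | cons a rest ih =>
    intro args tm h
    match a with
    | none =>
      simp only [List.foldl_cons, pvStepA]
      rw [ih args (tm ++ [none]) h]
      simp [pvOptIn]
    | some s =>
      simp only [List.foldl_cons, pvStepA]
      by_cases hc : args.contains s = true
      · simp only [hc, if_pos]
        rw [ih (args.erase s) tm (h.erase s)]
        constructor
        · rintro ⟨htm, hnd, hall⟩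
          refine ⟨htm, ?_, ?_⟩
          · refine List.nodup_cons.mpr ⟨fun hmem => ?_, hnd⟩
            have := hall _ hmem
            rw [pvOptIn_erase _ _ _ h] at this
            simp at this
          · intro b hb
            rcases List.mem_cons.mp hb with hb | hb
            · subst hb; simpa [pvOptIn] using hc
            · have := hall _ hb
              rw [pvOptIn_erase _ _ _ h] at this
              simp only [Bool.and_eq_true] at this
              exact this.1
        · rintro ⟨htm, hnd, hall⟩
          rcases List.nodup_cons.mp hnd with ⟨hns, hnd'⟩
          refine ⟨htm, hnd', fun b hb => ?_⟩
          rw [pvOptIn_erase _ _ _ h]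
          simp only [Bool.and_eq_true]
          refine ⟨hall _ (List.mem_cons_of_mem _ hb), ?_⟩
          simp only [bne_iff_ne, ne_eq]
          intro hh; exact hns (hh ▸ hb)
      · simp only [hc, if_neg, Bool.false_eq_true, not_false_iff]
        rw [ih args (tm ++ [some s]) h]
        constructor
        · rintro ⟨htm, -, -⟩; simp at htm
        · rintro ⟨-, -, hall⟩
          exact absurd (hall (some s) List.mem_cons_self) hc

theorem pvTooMany_false (kws : List (Option String)) (E : List String) :
    (kws.any (fun a => !pvOptIn a E || decide (2 ≤ PySem.List.count kws a)) = false) ↔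
      (kws.Nodup ∧ ∀ a ∈ kws, pvOptIn a E = true) := by
  rw [List.any_eq_false]
  constructor
  · intro hall
    constructor
    · rw [List.nodup_iff_count_le_one]
      intro a
      by_cases ha : a ∈ kws
      · have h' := Bool.eq_false_iff.mpr (hall a ha)
        simp only [Bool.or_eq_false_iff, Bool.not_eq_false', decide_eq_false_iff_not, not_le] at h'
        have h2 := h'.2
        rw [PySem.List.count_eq] at h2
        omega
      · simp [List.count_eq_zero_of_not_mem ha]
    · intro a ha
      have h' := Bool.eq_false_iff.mpr (hall a ha)
      simp only [Bool.or_eq_false_iff, Bool.not_eq_false'] at h'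
      exact h'.1
  · rintro ⟨hnd, hall⟩ a ha
    apply Bool.eq_false_iff.mp
    simp only [Bool.or_eq_false_iff, Bool.not_eq_false', decide_eq_false_iff_not, not_le]
    refine ⟨hall a ha, ?_⟩
    have := List.nodup_iff_count_le_one.mp hnd a
    rw [PySem.List.count_eq]
    omega

theorem pvMissing_false (kws : List (Option String)) (E : List String) :
    (E.any (fun e => !kws.contains (some e)) = false) ↔
      (E.filter (fun e => !kws.contains (some e)) = []) := by
  simp [List.any_eq_false, List.filter_eq_nil_iff]

-- ===== VERDICT (by name: the statement is the Claim_ definition above) =====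
theorem argumentsRight_spec : Claim_equal_argumentsRight := by
  intro d _
  unfold Spec_argumentsRight argumentsRight argumentsRight_alt
  simp only []
  rw [← List.foldl_map (f := fun k => (PySem.Dict.mk k).get? "arg") (g := pvStepA)]
  set E : List String := ["SnoutId","SpotTuneId","RangeShifter","MinimumAirGap","MetersetRateSetting","IsocenterData","Name","Description","GantryAngle","CouchAngle","CollimatorAngle"] with hE
  have hEexp : pvExpected = E := rfl
  set kws := ((PySem.Dict.mk d).getD "keywords" []).map (fun k => (PySem.Dict.mk k).get? "arg") with hkws
  have hN : E.Nodup := by decide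
  have h1 := pvLoop_fst kws E [] hN
  have h2 := pvLoop_snd kws E [] hN
  rw [hEexp]
  by_cases hp : kws.Nodup ∧ ∀ a ∈ kws, pvOptIn a E = true
  · have hsnd : (kws.foldl pvStepA (E, [])).2 = [] := h2.mpr ⟨rfl, hp.1, hp.2⟩
    have htm : (kws.any (fun a => !pvOptIn a E || decide (2 ≤ PySem.List.count kws a))) = false :=
      (pvTooMany_false kws E).mpr hp
    rw [hsnd, h1, htm]
    by_cases hq : E.filter (fun e => !kws.contains (some e)) = []
    · have hms : (E.any (fun e => !kws.contains (some e))) = false := (pvMissing_false kws E).mpr hq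
      rw [hq, hms]
      simp
    · have hms : (E.any (fun e => !kws.contains (some e))) = true := by
        cases h : (E.any (fun e => !kws.contains (some e))) with
        | false => exact absurd ((pvMissing_false kws E).mp h) hq
        | true => rfl
      have hq1 : (List.filter (fun e => !kws.contains (some e)) E).isEmpty = false := by
        cases hfe : List.filter (fun e => !kws.contains (some e)) E with
        | nil => exact absurd hfe hq
        | cons x xs => rfl
      rw [hms, hq1]
      simp
  · have hsnd : (kws.foldl pvStepA (E, [])).2 ≠ [] :=
      fun hh => hp ⟨(h2.mp hh).2.1, (h2.mp hh).2.2⟩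
    have htm : (kws.any (fun a => !pvOptIn a E || decide (2 ≤ PySem.List.count kws a))) = true := by
      cases h : (kws.any (fun a => !pvOptIn a E || decide (2 ≤ PySem.List.count kws a))) with
      | false => exact absurd ((pvTooMany_false kws E).mp h) hp
      | true => rfl
    have hsnd1 : (kws.foldl pvStepA (E, [])).2.isEmpty = false := by
      cases hfe : (kws.foldl pvStepA (E, [])).2 with
      | nil => exact absurd hfe hsnd
      | cons x xs => rfl
    rw [htm, hsnd1]
    simp
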